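-- pv_equiv track=rewrite | github.com/davidseungjin/Python | In4matx141_hw02_partB.py | myintersect_dic
-- ===== SOURCE A (Python) =====
-- def myintersect_dic(mydic1, mydic2):
-- 	myintersect_dic = {}
-- 	count_myintersect_dic = 0
-- 	for i in mydic1.keys():
-- 		if i in mydic2.keys():
-- 			myintersect_dic[i] = min(mydic1[i], mydic2[i])
-- 			count_myintersect_dic += 1
-- 	return count_myintersect_dic
-- ===== SOURCE B (Python) =====
-- def myintersect_dic(mydic1, mydic2):
--     xs = sorted(mydic1)
--     ys = sorted(mydic2)
--     i = j = n = 0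
--     while i < len(xs) and j < len(ys):
--         if xs[i] < ys[j]:
--             i += 1
--         elif ys[j] < xs[i]:
--             j += 1
--         else:
--             n += 1
--             i += 1
--             j += 1
--     return n
-- ===== Notes on version B (the rewrite author's own statement) =====
-- stated objective: alternative
-- what changed: Replaces A's hash-membership loop with manual counter (and dead min-value dict) by a sort-then-scan algorithm: sort both key lists and count common keys with a two-pointer merge.
import Mathlib
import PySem

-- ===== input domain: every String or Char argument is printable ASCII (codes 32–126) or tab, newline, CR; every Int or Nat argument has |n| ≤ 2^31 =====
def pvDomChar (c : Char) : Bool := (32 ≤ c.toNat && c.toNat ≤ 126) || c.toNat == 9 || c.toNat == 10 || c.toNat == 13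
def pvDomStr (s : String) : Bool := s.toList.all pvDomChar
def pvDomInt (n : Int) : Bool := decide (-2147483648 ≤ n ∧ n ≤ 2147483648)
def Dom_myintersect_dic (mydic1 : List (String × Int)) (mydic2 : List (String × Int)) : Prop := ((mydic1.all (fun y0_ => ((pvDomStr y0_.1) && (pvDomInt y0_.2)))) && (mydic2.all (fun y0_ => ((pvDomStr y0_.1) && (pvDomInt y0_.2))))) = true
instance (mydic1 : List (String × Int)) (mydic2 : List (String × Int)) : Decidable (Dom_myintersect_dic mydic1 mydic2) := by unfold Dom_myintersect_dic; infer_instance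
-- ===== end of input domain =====

-- B replaces A's hash-membership loop (with its dead min-value dict) by sort-then-scan:
-- sort both key lists and count common keys with a two-pointer merge (objective: alternative).

-- ===== PORT A =====
-- Loop over d1's keys; on a common key, store min of the two values (dead) and bump the counter.
-- mydic1[i]/mydic2[i] are ported as getD _ 0: the key is known present on every lookup A performs.
def myintersect_dic (mydic1 : List (String × Int)) (mydic2 : List (String × Int)) : Int :=
  let d1 := PySem.Dict.ofList mydic1
  let d2 := PySem.Dict.ofList mydic2
  (d1.keys.foldl
    (fun (st : PySem.Dict String Int × Int) i =>
      if d2.keys.contains i then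
        (st.1.insert i (min (d1.getD i 0) (d2.getD i 0)), st.2 + 1)
      else st)
    (PySem.Dict.empty, 0)).2

-- ===== PORT B =====
-- The two-pointer while loop: i, j, n are the loop state; exact transcription of Source B's loop.
def pvTwoPointer (xs ys : List String) (i j : Nat) (n : Int) : Int :=
  if hi : i < xs.length then
    if hj : j < ys.length then
      if xs[i] < ys[j] then pvTwoPointer xs ys (i + 1) j n
      else if ys[j] < xs[i] then pvTwoPointer xs ys i (j + 1) n
      else pvTwoPointer xs ys (i + 1) (j + 1) (n + 1)
    else n
  else n
termination_by (xs.length - i) + (ys.length - j)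
decreasing_by all_goals omega

-- xs = sorted(mydic1); ys = sorted(mydic2); then the merge loop from i = j = n = 0.
def myintersect_dic_alt (mydic1 : List (String × Int)) (mydic2 : List (String × Int)) : Int :=
  let xs := PySem.List.sorted (PySem.Dict.ofList mydic1).keys (fun x => x) false
  let ys := PySem.List.sorted (PySem.Dict.ofList mydic2).keys (fun x => x) false
  pvTwoPointer xs ys 0 0 0

-- ===== PRECONDITION & SPEC =====
def Spec_myintersect_dic (mydic1 : List (String × Int)) (mydic2 : List (String × Int)) (out : Int) : Prop := out = myintersect_dic_alt mydic1 mydic2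
instance (mydic1 : List (String × Int)) (mydic2 : List (String × Int)) (out : Int) : Decidable (Spec_myintersect_dic mydic1 mydic2 out) := by unfold Spec_myintersect_dic; infer_instance

-- ===== CLAIM (what is proved, stated in full; the proofs are below) =====
def Claim_equal_myintersect_dic : Prop := ∀ (mydic1 : List (String × Int)) (mydic2 : List (String × Int)), Dom_myintersect_dic mydic1 mydic2 → Spec_myintersect_dic mydic1 mydic2 (myintersect_dic mydic1 mydic2)

-- ===== LEMMAS AND PROOFS =====

-- A's loop only ever increments the counter on keys passing the membership test,
-- so its counter component is the length of the filtered key list.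
theorem pv_count_loop (p : String → Bool) (g : PySem.Dict String Int → String → Int)
    (ks : List String) (d : PySem.Dict String Int) (c : Int) :
    (ks.foldl
      (fun (st : PySem.Dict String Int × Int) i =>
        if p i then (st.1.insert i (g st.1 i), st.2 + 1) else st)
      (d, c)).2
    = c + ((ks.filter p).length : Int) := by
  induction ks generalizing d c with
  | nil => simp
  | cons k ks ih =>
    by_cases h : p k
    · simp [h, ih]; omega
    · simp [h, ih]

-- Structural (list) form of the two-pointer merge, used as the induction vehicle.
def pvMergeCount : List String → List String → Int
  | [], _ => 0
  | _ :: _, [] => 0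
  | x :: xs, y :: ys =>
    if x < y then pvMergeCount xs (y :: ys)
    else if y < x then pvMergeCount (x :: xs) ys
    else 1 + pvMergeCount xs ys

-- The index loop computes n + the structural merge count of the remaining suffixes.
theorem pvTwoPointer_eq_mergeCount (xs ys : List String) (i j : Nat) (n : Int) :
    pvTwoPointer xs ys i j n = n + pvMergeCount (xs.drop i) (ys.drop j) := by
  rw [pvTwoPointer]
  split
  · rename_i hi
    split
    · rename_i hj
      have hdx : xs.drop i = xs[i] :: xs.drop (i + 1) := List.drop_eq_getElem_cons hi
      have hdy : ys.drop j = ys[j] :: ys.drop (j + 1) := List.drop_eq_getElem_cons hj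
      split
      · rename_i hlt
        rw [pvTwoPointer_eq_mergeCount, hdx, hdy, pvMergeCount]
        simp [hlt]
      · split
        · rename_i h1 h2
          rw [pvTwoPointer_eq_mergeCount, hdx, hdy, pvMergeCount]
          simp [h1, h2]
        · rename_i h1 h2
          rw [pvTwoPointer_eq_mergeCount, hdx, hdy, pvMergeCount]
          simp [h1, h2]; omega
    · rename_i hj
      rw [show ys.drop j = [] from List.drop_of_length_le (by omega)]
      cases xs.drop i <;> simp [pvMergeCount]
  · rename_i hi
    rw [show xs.drop i = [] from List.drop_of_length_le (by omega)]
    simp [pvMergeCount]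
termination_by (xs.length - i) + (ys.length - j)
decreasing_by all_goals omega

-- On strictly increasing lists, the merge count is the number of xs-elements present in ys.
theorem pvMergeCount_eq_filter (xs ys : List String)
    (hx : xs.Pairwise (· < ·)) (hy : ys.Pairwise (· < ·)) :
    pvMergeCount xs ys = ((xs.filter (fun x => ys.contains x)).length : Int) := by
  induction xs generalizing ys with
  | nil => simp [pvMergeCount]
  | cons x xs ih =>
    induction ys with
    | nil => simp [pvMergeCount]
    | cons y ys ihy =>
      have hx' := List.Pairwise.of_cons hx
      have hy' := List.Pairwise.of_cons hy
      by_cases h1 : x < y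
      · -- x is smaller than everything in y :: ys, so x ∉ y :: ys
        have hxnot : (y :: ys).contains x = false := by
          simp only [List.contains_eq_mem, decide_eq_false_iff_not, List.mem_cons]
          rintro (rfl | hmem)
          · exact absurd h1 (lt_irrefl x)
          · have := (List.pairwise_cons.mp hy).1 x hmem
            exact absurd (h1.trans this) (lt_irrefl x)
        rw [pvMergeCount, if_pos h1, ih (y :: ys) hx' hy,
            List.filter_cons_of_neg (by simpa using hxnot)]
      · by_cases h2 : y < x
        · -- y is smaller than everything in x :: xs, so membership in y :: ys = membership in ys
          have hcong : ∀ a ∈ x :: xs, (y :: ys).contains a = ys.contains a := by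
            intro a ha
            have hya : y < a := by
              rcases List.mem_cons.mp ha with rfl | hmem
              · exact h2
              · exact h2.trans ((List.pairwise_cons.mp hx).1 a hmem)
            simp only [List.contains_eq_mem, List.mem_cons, decide_eq_decide]
            constructor
            · rintro (rfl | hm)
              · exact absurd hya (lt_irrefl a)
              · exact hm
            · exact Or.inr
          have heq : List.filter (fun a => (y :: ys).contains a) (x :: xs)
              = List.filter (fun a => ys.contains a) (x :: xs) := List.filter_congr hcong
          rw [pvMergeCount, if_neg h1, if_pos h2, ihy hy', heq]
        · -- x = y
          have hxy : x = y := le_antisymm (le_of_not_gt h2) (le_of_not_gt h1)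
          subst hxy
          have hcong : ∀ a ∈ xs, (x :: ys).contains a = ys.contains a := by
            intro a ha
            have hxa : x < a := (List.pairwise_cons.mp hx).1 a ha
            simp only [List.contains_eq_mem, List.mem_cons, decide_eq_decide]
            constructor
            · rintro (rfl | hm)
              · exact absurd hxa (lt_irrefl a)
              · exact hm
            · exact Or.inr
          have hpos : (x :: ys).contains x = true := by simp
          have heq : List.filter (fun a => (x :: ys).contains a) xs
              = List.filter (fun a => ys.contains a) xs := List.filter_congr hcong
          rw [pvMergeCount, if_neg h1, if_neg h2, ih ys hx' hy',
              List.filter_cons_of_pos hpos, heq]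
          simp [List.length_cons]
          omega

-- strictly increasing: sorted of a Nodup list
theorem pv_sorted_pairwise_lt (l : List String) (hnd : l.Nodup) :
    (PySem.List.sorted l (fun x => x) false).Pairwise (· < ·) := by
  have h1 : (PySem.List.sorted l (fun x => x) false).Pairwise (· ≤ ·) :=
    PySem.List.sorted_pairwise l (fun x => x)
  have h2 : (PySem.List.sorted l (fun x => x) false).Nodup :=
    (PySem.List.sorted_perm l (fun x => x) false).nodup_iff.mpr hnd
  exact (h1.and h2).imp (fun ⟨hle, hne⟩ => lt_of_le_of_ne hle hne)

theorem myintersect_dic_eq_alt (mydic1 mydic2 : List (String × Int)) :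
    myintersect_dic mydic1 mydic2 = myintersect_dic_alt mydic1 mydic2 := by
  unfold myintersect_dic myintersect_dic_alt
  rw [pv_count_loop (p := fun i => (PySem.Dict.ofList mydic2).keys.contains i)
        (g := fun st i => min ((PySem.Dict.ofList mydic1).getD i 0) ((PySem.Dict.ofList mydic2).getD i 0))]
  set k1 := (PySem.Dict.ofList mydic1).keys with hk1
  set k2 := (PySem.Dict.ofList mydic2).keys with hk2
  have hnd1 : k1.Nodup := PySem.Dict.nodup_keys_ofList mydic1
  have hnd2 : k2.Nodup := PySem.Dict.nodup_keys_ofList mydic2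
  rw [pvTwoPointer_eq_mergeCount]
  simp only [List.drop_zero, zero_add]
  rw [pvMergeCount_eq_filter _ _ (pv_sorted_pairwise_lt k1 hnd1) (pv_sorted_pairwise_lt k2 hnd2)]
  have hcong : ∀ a ∈ PySem.List.sorted k1 (fun x => x) false,
      (PySem.List.sorted k2 (fun x => x) false).contains a = k2.contains a := by
    intro a _
    simp only [List.contains_eq_mem, PySem.List.mem_sorted]
  rw [List.filter_congr hcong]
  have hperm : List.Perm
      ((PySem.List.sorted k1 (fun x => x) false).filter (fun x => k2.contains x))
      (k1.filter (fun x => k2.contains x)) :=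
    (PySem.List.sorted_perm k1 (fun x => x) false).filter _
  rw [hperm.length_eq]

-- ===== VERDICT (by name: the statement is the Claim_ definition above) =====
theorem myintersect_dic_spec : Claim_equal_myintersect_dic := by
  intro d1 d2 _
  exact myintersect_dic_eq_alt d1 d2
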